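-- pv_equiv track=rewrite | github.com/YEUNU/HypoReflect | models/hyporeflect/stages/execution/planning_state.py | _normalize_source_anchor
-- ===== SOURCE A (Python) =====
-- from typing import Any
-- from typing import Any, Optional
--
-- def _normalize_source_anchor(value: Any) -> Optional[str]:
--     if value is None:
--         return None
--     text = str(value).strip().lower()
--     if not text or text in {'null', 'none', 'n/a'}:
--         return None
--     has_income = any((tok in text for tok in ['income statement', 'statement of income', 'p&l', 'profit and loss']))
--     has_balance = any((tok in text for tok in ['balance sheet', 'statement of financial position']))
--     has_cashflow = any((tok in text for tok in ['cash flow statement', 'statement of cash flows', 'cash flow']))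
--     has_note = 'note table' in text
--     hit_count = sum((1 for flag in [has_income, has_balance, has_cashflow, has_note] if flag))
--     if hit_count > 1:
--         return None
--     if has_income:
--         return 'income statement'
--     if has_balance:
--         return 'balance sheet'
--     if has_cashflow:
--         return 'cash flow statement'
--     if has_note:
--         return 'note table'
--     return None
-- ===== SOURCE B (Python) =====
-- from typing import Any, Optional
--
-- _TOKEN_LABELS = [
--     ('income statement', 'income statement'),
--     ('statement of income', 'income statement'),
--     ('p&l', 'income statement'),
--     ('profit and loss', 'income statement'),
--     ('balance sheet', 'balance sheet'),
--     ('statement of financial position', 'balance sheet'),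
--     ('cash flow statement', 'cash flow statement'),
--     ('statement of cash flows', 'cash flow statement'),
--     ('cash flow', 'cash flow statement'),
--     ('note table', 'note table'),
-- ]
--
-- def _normalize_source_anchor(value: Any) -> Optional[str]:
--     if value is None:
--         return None
--     text = str(value).strip().lower()
--     if not text or text in {'null', 'none', 'n/a'}:
--         return None
--     # Single left-to-right scan over the suffixes of the text with a
--     # conflict-detecting accumulator: the first label one of whose tokens starts
--     # at some position is kept; a token of a *different* label anywhere makes
--     # the result ambiguous and we bail out with None immediately.
--     found = None
--     for i in range(len(text)):
--         for tok, label in _TOKEN_LABELS: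
--             if text.startswith(tok, i):
--                 if found is None:
--                     found = label
--                 elif found != label:
--                     return None
--     return found
-- ===== Notes on version B (the rewrite author's own statement) =====
-- stated objective: alternative
-- what changed: Replaces the four staged whole-text substring-membership tests plus hit-count sum and priority if-chain with a single left-to-right scan over the positions of the text driven by a conflict-detecting accumulator (token/label state machine) that bails out with None as soon as tokens of two different labels are seen.
import Mathlib
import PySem

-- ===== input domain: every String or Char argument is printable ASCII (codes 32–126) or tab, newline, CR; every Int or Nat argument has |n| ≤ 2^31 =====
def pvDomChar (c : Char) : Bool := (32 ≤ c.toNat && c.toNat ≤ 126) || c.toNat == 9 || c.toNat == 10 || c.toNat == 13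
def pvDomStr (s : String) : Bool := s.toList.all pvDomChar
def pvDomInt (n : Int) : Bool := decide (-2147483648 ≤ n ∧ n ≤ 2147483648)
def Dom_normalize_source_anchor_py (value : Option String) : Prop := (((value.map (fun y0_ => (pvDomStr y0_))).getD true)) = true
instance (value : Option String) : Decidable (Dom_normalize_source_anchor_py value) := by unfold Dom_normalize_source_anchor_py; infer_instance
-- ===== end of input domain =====

-- B replaces A's four staged membership tests + hit count + priority chain with one
-- left-to-right scan over the positions of the text with a conflict-detecting accumulator.


-- ===== PORT A =====
def normalize_source_anchor_py (value : Option String) : Option String :=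
  match value with
  | none => none
  | some v =>
    let text := PySem.Str.lower (PySem.Str.strip v)
    if text = "" ∨ text = "null" ∨ text = "none" ∨ text = "n/a" then none
    else
      let has_income := ["income statement", "statement of income", "p&l", "profit and loss"].any
        (fun tok => PySem.Str.isIn tok text)
      let has_balance := ["balance sheet", "statement of financial position"].any
        (fun tok => PySem.Str.isIn tok text)
      let has_cashflow := ["cash flow statement", "statement of cash flows", "cash flow"].any
        (fun tok => PySem.Str.isIn tok text)
      let has_note := PySem.Str.isIn "note table" text
      let hit_count : Int := ([has_income, has_balance, has_cashflow, has_note].filter (fun flag => flag)).foldl (fun acc _ => acc + 1) 0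
      if hit_count > 1 then none
      else if has_income then some "income statement"
      else if has_balance then some "balance sheet"
      else if has_cashflow then some "cash flow statement"
      else if has_note then some "note table"
      else none

-- ===== PORT B =====
-- the (token, label) table of Source B, tokens as char lists
def pvTokenLabels : List (List Char × String) :=
  [("income statement".toList, "income statement"),
   ("statement of income".toList, "income statement"),
   ("p&l".toList, "income statement"),
   ("profit and loss".toList, "income statement"),
   ("balance sheet".toList, "balance sheet"),
   ("statement of financial position".toList, "balance sheet"),
   ("cash flow statement".toList, "cash flow statement"),
   ("statement of cash flows".toList, "cash flow statement"),
   ("cash flow".toList, "cash flow statement"),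
   ("note table".toList, "note table")]

-- inner loop of Source B over the token table at the current suffix;
-- 'none' = the early 'return None' (conflict), 'some f' = updated accumulator
def pvInner : List (List Char × String) → List Char → Option String → Option (Option String)
  | [], _, found => some found
  | (tok, label) :: rest, suffix, found =>
    if PySem.Chars.startswith suffix tok then
      match found with
      | none => pvInner rest suffix (some label)
      | some f => if f ≠ label then none else pvInner rest suffix found
    else pvInner rest suffix found

-- outer position loop of Source B: the remaining text from position i, as structural recursion
def pvOuter : List Char → Option String → Option String
  | [], found => found
  | c :: t, found =>
    match pvInner pvTokenLabels (c :: t) found with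
    | none => none
    | some found' => pvOuter t found'

def normalize_source_anchor_py_alt (value : Option String) : Option String :=
  match value with
  | none => none
  | some v =>
    let text := PySem.Str.lower (PySem.Str.strip v)
    if text = "" ∨ text = "null" ∨ text = "none" ∨ text = "n/a" then none
    else pvOuter text.toList none

-- ===== PRECONDITION & SPEC =====
def Spec_normalize_source_anchor_py (value : Option String) (out : Option String) : Prop := out = normalize_source_anchor_py_alt value
instance (value : Option String) (out : Option String) : Decidable (Spec_normalize_source_anchor_py value out) := by unfold Spec_normalize_source_anchor_py; infer_instance

-- ===== CLAIM (what is proved, stated in full; the proofs are below) =====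
def Claim_equal_normalize_source_anchor_py : Prop := ∀ (value : Option String), Dom_normalize_source_anchor_py value → Spec_normalize_source_anchor_py value (normalize_source_anchor_py value)

-- ===== LEMMAS AND PROOFS =====

-- abstract conflict automaton over the stream of matched labels
def pvF : List String → Option String → Option (Option String)
  | [], f => some f
  | l :: ls, none => pvF ls (some l)
  | l :: ls, some f => if f ≠ l then none else pvF ls (some f)

-- labels matched at a given suffix, in table order
def pvMatched (s : List Char) : List String :=
  (pvTokenLabels.filter (fun p => PySem.Chars.startswith s p.1)).map Prod.snd

-- all labels matched over the scan, in scan order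
def pvAll : List Char → List String
  | [] => []
  | c :: t => pvMatched (c :: t) ++ pvAll t

lemma pvInner_eq_pvF (toks : List (List Char × String)) (s : List Char) (found : Option String) :
    pvInner toks s found = pvF ((toks.filter (fun p => PySem.Chars.startswith s p.1)).map Prod.snd) found := by
  induction toks generalizing found with
  | nil => rfl
  | cons p rest ih =>
    obtain ⟨tok, label⟩ := p
    by_cases h : PySem.Chars.startswith s tok = true
    · cases found with
      | none => simp [pvInner, h, pvF, ih]
      | some f =>
        by_cases hf : f = label
        · simp [pvInner, h, hf, pvF, ih]
        · simp [pvInner, h, hf, pvF]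
    · simp [pvInner, h, ih]

lemma pvF_append (a b : List String) (f : Option String) :
    pvF (a ++ b) f = (pvF a f).bind (fun f' => pvF b f') := by
  induction a generalizing f with
  | nil => rfl
  | cons l ls ih =>
    cases f with
    | none => simp [pvF, ih]
    | some g =>
      by_cases h : g = l
      · simp [pvF, h, ih]
      · simp [pvF, h]

lemma pvOuter_eq (s : List Char) (found : Option String) :
    pvOuter s found = (pvF (pvAll s) found).getD none := by
  induction s generalizing found with
  | nil => rfl
  | cons c t ih =>
    rw [pvOuter, pvInner_eq_pvF]
    show (match pvF (pvMatched (c :: t)) found with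
          | none => none
          | some found' => pvOuter t found') = _
    rw [show pvAll (c :: t) = pvMatched (c :: t) ++ pvAll t from rfl, pvF_append]
    cases h : pvF (pvMatched (c :: t)) found with
    | none => simp
    | some f' => simp [ih]

-- pvF from state (some x): dead iff some element differs from x
lemma pvF_some (ls : List String) (x : String) :
    pvF ls (some x) = if ∀ l ∈ ls, l = x then some (some x) else none := by
  induction ls with
  | nil => simp [pvF]
  | cons l ls ih =>
    by_cases h : x = l
    · subst h
      by_cases h2 : ∀ l' ∈ ls, l' = x
      · simp [pvF, ih]
      · simp [pvF, ih]
    · simp [pvF, h]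
      intro heq
      exact absurd heq.symm h

lemma pvF_conflict (ls : List String) (a b : String) (ha : a ∈ ls) (hb : b ∈ ls) (hab : a ≠ b) :
    pvF ls none = none := by
  cases ls with
  | nil => simp at ha
  | cons l t =>
    show pvF t (some l) = none
    rw [pvF_some]
    rw [if_neg]
    intro hall
    rcases List.mem_cons.mp ha with h1 | h1 <;> rcases List.mem_cons.mp hb with h2 | h2
    · exact hab (h1.trans h2.symm)
    · exact hab (h1 ▸ (hall b h2).symm)
    · exact hab ((hall a h1).trans h2.symm)
    · exact hab ((hall a h1).trans (hall b h2).symm)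

-- membership in the matched-label stream ↔ some token of that label occurs in the text
lemma mem_pvAll_iff (s : List Char) (l : String) :
    l ∈ pvAll s ↔ ∃ p ∈ pvTokenLabels, p.2 = l ∧ PySem.Chars.isIn p.1 s = true := by
  have key : ∀ s : List Char, l ∈ pvAll s ↔
      ∃ p ∈ pvTokenLabels, p.2 = l ∧ ∃ j, p.1 <+: s.drop j := by
    intro s
    induction s with
    | nil =>
      constructor
      · intro h; simp [pvAll] at h
      · rintro ⟨p, hp, -, j, hpre⟩
        exfalso
        have : p.1 ≠ [] := by
          fin_cases hp <;> simp
        simp at hpre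
        exact this hpre
    | cons c t ih =>
      rw [show pvAll (c :: t) = pvMatched (c :: t) ++ pvAll t from rfl, List.mem_append, ih]
      unfold pvMatched
      simp only [List.mem_map, List.mem_filter]
      constructor
      · rintro (⟨p, ⟨hp, hsw⟩, hl⟩ | ⟨p, hp, hl, j, hpre⟩)
        · exact ⟨p, hp, hl, 0, (PySem.Chars.startswith_iff _ _).mp hsw⟩
        · exact ⟨p, hp, hl, j + 1, by simpa using hpre⟩
      · rintro ⟨p, hp, hl, j, hpre⟩
        cases j with
        | zero => exact Or.inl ⟨p, ⟨hp, (PySem.Chars.startswith_iff _ _).mpr (by simpa using hpre)⟩, hl⟩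
        | succ j => exact Or.inr ⟨p, hp, hl, j, by simpa using hpre⟩
  rw [key]
  constructor
  · rintro ⟨p, hp, hl, j, hpre⟩
    exact ⟨p, hp, hl, (PySem.Chars.exists_prefix_drop_iff_isIn _ _).mp ⟨j, hpre⟩⟩
  · rintro ⟨p, hp, hl, hin⟩
    obtain ⟨j, hpre⟩ := (PySem.Chars.exists_prefix_drop_iff_isIn _ _).mpr hin
    exact ⟨p, hp, hl, j, hpre⟩

-- classification: the labels occurring in the scan are exactly the labels of matched groups
lemma mem_pvAll_class (s : List Char) (l : String) :
    l ∈ pvAll s ↔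
      ((l = "income statement" ∧ (PySem.Chars.isIn "income statement".toList s ∨ PySem.Chars.isIn "statement of income".toList s ∨ PySem.Chars.isIn "p&l".toList s ∨ PySem.Chars.isIn "profit and loss".toList s)) ∨
       (l = "balance sheet" ∧ (PySem.Chars.isIn "balance sheet".toList s ∨ PySem.Chars.isIn "statement of financial position".toList s)) ∨
       (l = "cash flow statement" ∧ (PySem.Chars.isIn "cash flow statement".toList s ∨ PySem.Chars.isIn "statement of cash flows".toList s ∨ PySem.Chars.isIn "cash flow".toList s)) ∨
       (l = "note table" ∧ PySem.Chars.isIn "note table".toList s)) := by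
  rw [mem_pvAll_iff]
  simp only [pvTokenLabels, List.mem_cons, List.not_mem_nil, or_false]
  constructor
  · rintro ⟨p, hp, hl, hin⟩
    subst hl
    rcases hp with rfl|rfl|rfl|rfl|rfl|rfl|rfl|rfl|rfl|rfl
    · exact Or.inl ⟨rfl, Or.inl hin⟩
    · exact Or.inl ⟨rfl, Or.inr (Or.inl hin)⟩
    · exact Or.inl ⟨rfl, Or.inr (Or.inr (Or.inl hin))⟩
    · exact Or.inl ⟨rfl, Or.inr (Or.inr (Or.inr hin))⟩
    · exact Or.inr (Or.inl ⟨rfl, Or.inl hin⟩)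
    · exact Or.inr (Or.inl ⟨rfl, Or.inr hin⟩)
    · exact Or.inr (Or.inr (Or.inl ⟨rfl, Or.inl hin⟩))
    · exact Or.inr (Or.inr (Or.inl ⟨rfl, Or.inr (Or.inl hin)⟩))
    · exact Or.inr (Or.inr (Or.inl ⟨rfl, Or.inr (Or.inr hin)⟩))
    · exact Or.inr (Or.inr (Or.inr ⟨rfl, hin⟩))
  · rintro (⟨rfl, h|h|h|h⟩ | ⟨rfl, h|h⟩ | ⟨rfl, h|h|h⟩ | ⟨rfl, h⟩)
    · exact ⟨_, Or.inl rfl, rfl, h⟩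
    · exact ⟨_, Or.inr (Or.inl rfl), rfl, h⟩
    · exact ⟨_, Or.inr (Or.inr (Or.inl rfl)), rfl, h⟩
    · exact ⟨_, Or.inr (Or.inr (Or.inr (Or.inl rfl))), rfl, h⟩
    · exact ⟨_, Or.inr (Or.inr (Or.inr (Or.inr (Or.inl rfl)))), rfl, h⟩
    · exact ⟨_, Or.inr (Or.inr (Or.inr (Or.inr (Or.inr (Or.inl rfl))))), rfl, h⟩
    · exact ⟨_, Or.inr (Or.inr (Or.inr (Or.inr (Or.inr (Or.inr (Or.inl rfl)))))), rfl, h⟩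
    · exact ⟨_, Or.inr (Or.inr (Or.inr (Or.inr (Or.inr (Or.inr (Or.inr (Or.inl rfl))))))), rfl, h⟩
    · exact ⟨_, Or.inr (Or.inr (Or.inr (Or.inr (Or.inr (Or.inr (Or.inr (Or.inr (Or.inl rfl)))))))), rfl, h⟩
    · exact ⟨_, Or.inr (Or.inr (Or.inr (Or.inr (Or.inr (Or.inr (Or.inr (Or.inr (Or.inr rfl)))))))), rfl, h⟩


-- evaluation of the scan, given the four group-match booleans of A
lemma pvScan_empty (s : List Char) (h : pvAll s = []) :
    (pvF (pvAll s) none).getD none = none := by rw [h]; rfl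

lemma pvScan_single (s : List Char) (x : String) (hmem : x ∈ pvAll s)
    (hall : ∀ l ∈ pvAll s, l = x) : (pvF (pvAll s) none).getD none = some x := by
  cases hA : pvAll s with
  | nil => rw [hA] at hmem; simp at hmem
  | cons l t =>
    rw [hA] at hall
    have hl : l = x := hall l (by simp)
    subst hl
    show (pvF t (some l)).getD none = some l
    rw [pvF_some, if_pos (fun l' hl' => hall l' (by simp [hl']))]
    rfl

lemma pvScan_conf (s : List Char) (a b : String) (ha : a ∈ pvAll s) (hb : b ∈ pvAll s)
    (hab : a ≠ b) : (pvF (pvAll s) none).getD none = none := by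
  rw [pvF_conflict (pvAll s) a b ha hb hab]; rfl

lemma pvScan_eval (s : List Char) (bI bB bC bN : Bool)
    (hI : (PySem.Chars.isIn "income statement".toList s || (PySem.Chars.isIn "statement of income".toList s || (PySem.Chars.isIn "p&l".toList s || PySem.Chars.isIn "profit and loss".toList s))) = bI)
    (hB : (PySem.Chars.isIn "balance sheet".toList s || PySem.Chars.isIn "statement of financial position".toList s) = bB)
    (hC : (PySem.Chars.isIn "cash flow statement".toList s || (PySem.Chars.isIn "statement of cash flows".toList s || PySem.Chars.isIn "cash flow".toList s)) = bC)
    (hN : PySem.Chars.isIn "note table".toList s = bN) :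
    (pvF (pvAll s) none).getD none =
      if List.foldl (fun acc _ => acc + 1) (0 : Int) (List.filter (fun flag => flag) [bI, bB, bC, bN]) > 1 then none
      else if bI = true then some "income statement"
      else if bB = true then some "balance sheet"
      else if bC = true then some "cash flow statement"
      else if bN = true then some "note table"
      else none := by
  have memI : bI = true → "income statement" ∈ pvAll s := by
    intro h; rw [h] at hI; simp only [Bool.or_eq_true] at hI
    exact (mem_pvAll_class s _).mpr (Or.inl ⟨rfl, hI⟩)
  have memB : bB = true → "balance sheet" ∈ pvAll s := by
    intro h; rw [h] at hB; simp only [Bool.or_eq_true] at hB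
    exact (mem_pvAll_class s _).mpr (Or.inr (Or.inl ⟨rfl, hB⟩))
  have memC : bC = true → "cash flow statement" ∈ pvAll s := by
    intro h; rw [h] at hC; simp only [Bool.or_eq_true] at hC
    exact (mem_pvAll_class s _).mpr (Or.inr (Or.inr (Or.inl ⟨rfl, hC⟩)))
  have memN : bN = true → "note table" ∈ pvAll s := by
    intro h; rw [h] at hN
    exact (mem_pvAll_class s _).mpr (Or.inr (Or.inr (Or.inr ⟨rfl, hN⟩)))
  have cls : ∀ l ∈ pvAll s,
      (l = "income statement" ∧ bI = true) ∨ (l = "balance sheet" ∧ bB = true) ∨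
      (l = "cash flow statement" ∧ bC = true) ∨ (l = "note table" ∧ bN = true) := by
    intro l hl
    rw [mem_pvAll_class] at hl
    rcases hl with ⟨h, hd⟩ | ⟨h, hd⟩ | ⟨h, hd⟩ | ⟨h, hd⟩
    · refine Or.inl ⟨h, ?_⟩; rw [← hI]; simp only [Bool.or_eq_true]; exact hd
    · refine Or.inr (Or.inl ⟨h, ?_⟩); rw [← hB]; simp only [Bool.or_eq_true]; exact hd
    · refine Or.inr (Or.inr (Or.inl ⟨h, ?_⟩)); rw [← hC]; simp only [Bool.or_eq_true]; exact hd
    · exact Or.inr (Or.inr (Or.inr ⟨h, hN ▸ hd⟩))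
  clear hI hB hC hN
  cases bI <;> cases bB <;> cases bC <;> cases bN
  -- FFFF
  · refine (pvScan_empty s (List.eq_nil_iff_forall_not_mem.mpr ?_)).trans (by decide)
    intro l hl
    rcases cls l hl with ⟨-, h⟩ | ⟨-, h⟩ | ⟨-, h⟩ | ⟨-, h⟩ <;> simp at h
  -- FFFT
  · refine (pvScan_single s "note table" (memN rfl) ?_).trans (by decide)
    intro l hl
    rcases cls l hl with ⟨-, h⟩ | ⟨-, h⟩ | ⟨-, h⟩ | ⟨h, -⟩ <;> simp_all
  -- FFTF
  · refine (pvScan_single s "cash flow statement" (memC rfl) ?_).trans (by decide)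
    intro l hl
    rcases cls l hl with ⟨-, h⟩ | ⟨-, h⟩ | ⟨h, -⟩ | ⟨-, h⟩ <;> simp_all
  -- FFTT
  · exact (pvScan_conf s _ _ (memC rfl) (memN rfl) (by decide)).trans (by decide)
  -- FTFF
  · refine (pvScan_single s "balance sheet" (memB rfl) ?_).trans (by decide)
    intro l hl
    rcases cls l hl with ⟨-, h⟩ | ⟨h, -⟩ | ⟨-, h⟩ | ⟨-, h⟩ <;> simp_all
  -- FTFT
  · exact (pvScan_conf s _ _ (memB rfl) (memN rfl) (by decide)).trans (by decide)
  -- FTTF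
  · exact (pvScan_conf s _ _ (memB rfl) (memC rfl) (by decide)).trans (by decide)
  -- FTTT
  · exact (pvScan_conf s _ _ (memB rfl) (memC rfl) (by decide)).trans (by decide)
  -- TFFF
  · refine (pvScan_single s "income statement" (memI rfl) ?_).trans (by decide)
    intro l hl
    rcases cls l hl with ⟨h, -⟩ | ⟨-, h⟩ | ⟨-, h⟩ | ⟨-, h⟩ <;> simp_all
  -- TFFT
  · exact (pvScan_conf s _ _ (memI rfl) (memN rfl) (by decide)).trans (by decide)
  -- TFTF
  · exact (pvScan_conf s _ _ (memI rfl) (memC rfl) (by decide)).trans (by decide)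
  -- TFTT
  · exact (pvScan_conf s _ _ (memI rfl) (memC rfl) (by decide)).trans (by decide)
  -- TTFF
  · exact (pvScan_conf s _ _ (memI rfl) (memB rfl) (by decide)).trans (by decide)
  -- TTFT
  · exact (pvScan_conf s _ _ (memI rfl) (memB rfl) (by decide)).trans (by decide)
  -- TTTF
  · exact (pvScan_conf s _ _ (memI rfl) (memB rfl) (by decide)).trans (by decide)
  -- TTTT
  · exact (pvScan_conf s _ _ (memI rfl) (memB rfl) (by decide)).trans (by decide)


-- ===== VERDICT (by name: the statement is the Claim_ definition above) =====
set_option maxHeartbeats 2000000 in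
theorem normalize_source_anchor_py_spec : Claim_equal_normalize_source_anchor_py := by
  intro value _
  unfold Spec_normalize_source_anchor_py normalize_source_anchor_py normalize_source_anchor_py_alt
  cases value with
  | none => rfl
  | some v =>
    simp only []
    split
    · rfl
    · rw [pvOuter_eq]
      simp only [List.any_cons, List.any_nil, Bool.or_false, PySem.Str.isIn_eq]
      rw [pvScan_eval _ _ _ _ _ rfl rfl rfl rfl]
      rfl
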